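-- pv_equiv track=rewrite | github.com/FilipBienkowski3/PythonBasics | Zestaw7/16.py | system_osemkowy
-- ===== SOURCE A (Python) =====
-- def system_osemkowy(n):
--   count_5 = 0
--   while n > 0:
--     x = n % 8
--     if x == 5:
--       count_5 += 1
--     n = n // 8
--   return count_5 % 2 == 0
-- ===== SOURCE B (Python) =====
-- def system_osemkowy(n):
--     # n <= 0: the reference's loop never runs, count stays 0 (even) -> True
--     return n <= 0 or oct(n).count('5') % 2 == 0
-- ===== Notes on version B (the rewrite author's own statement) =====
-- stated objective: idiomatic
-- what changed: Replaces the manual mod/div digit-extraction loop and running counter with the standard-library octal string representation oct(n) and a direct substring count of '5', checking that count's parity.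
import Mathlib
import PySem

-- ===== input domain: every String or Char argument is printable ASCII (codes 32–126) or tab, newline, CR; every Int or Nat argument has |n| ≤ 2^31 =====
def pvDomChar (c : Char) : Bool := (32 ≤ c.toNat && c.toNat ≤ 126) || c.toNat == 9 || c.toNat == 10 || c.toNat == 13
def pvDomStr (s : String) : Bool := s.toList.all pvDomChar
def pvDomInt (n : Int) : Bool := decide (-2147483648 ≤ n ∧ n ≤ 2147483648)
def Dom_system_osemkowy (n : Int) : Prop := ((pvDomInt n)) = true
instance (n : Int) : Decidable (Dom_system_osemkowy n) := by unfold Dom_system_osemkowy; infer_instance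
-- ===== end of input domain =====

-- B drops A's manual mod/div digit-extraction loop: it renders the number as its
-- octal string (oct(n)) and counts '5' there directly (objective: idiomatic).

-- ===== PORT A =====
-- the 'while n > 0' loop, carrying the running count_5
def pvALoop (n : Int) (count5 : Int) : Int :=
  if _h : 0 < n then
    pvALoop (PySem.Int.floordiv n 8)
      (if PySem.Int.mod n 8 == 5 then count5 + 1 else count5)
  else count5
termination_by n.toNat
decreasing_by
  have h8 : PySem.Int.floordiv n 8 = n / 8 := by
    simp [PySem.Int.floordiv, Int.fdiv_eq_ediv]
  rw [h8]; omega

def system_osemkowy (n : Int) : Bool :=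
  PySem.Int.mod (pvALoop n 0) 2 == 0

-- ===== PORT B =====
-- oct(n) for n > 0, ported by hand digit by digit: "0o" followed by the octal
-- digits, most significant first (exact for n > 0).
def pvOctDigits (n : Int) : List Char :=
  if _h : 0 < n then
    pvOctDigits (PySem.Int.floordiv n 8) ++
      [Char.ofNat (48 + (PySem.Int.mod n 8).toNat)]
  else []
termination_by n.toNat
decreasing_by
  have h8 : PySem.Int.floordiv n 8 = n / 8 := by
    simp [PySem.Int.floordiv, Int.fdiv_eq_ediv]
  rw [h8]; omega

-- .count('5') with a single-character needle = count of that character (exact)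
def system_osemkowy_alt (n : Int) : Bool :=
  n ≤ 0 || (('0' :: 'o' :: pvOctDigits n).count '5') % 2 == 0

-- ===== PRECONDITION & SPEC =====
def Spec_system_osemkowy (n : Int) (out : Bool) : Prop := out = system_osemkowy_alt n
instance (n : Int) (out : Bool) : Decidable (Spec_system_osemkowy n out) := by unfold Spec_system_osemkowy; infer_instance

-- ===== CLAIM (what is proved, stated in full; the proofs are below) =====
def Claim_equal_system_osemkowy : Prop := ∀ (n : Int), Dom_system_osemkowy n → Spec_system_osemkowy n (system_osemkowy n)

-- ===== LEMMAS AND PROOFS =====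

theorem pvALoop_eq_count (k : Nat) : ∀ (n c : Int), n.toNat ≤ k →
    pvALoop n c = c + ((pvOctDigits n).count '5' : Int) := by
  induction k with
  | zero =>
    intro n c h
    have hn : ¬ 0 < n := by omega
    rw [pvALoop, pvOctDigits]
    simp [hn]
  | succ k ih =>
    intro n c h
    by_cases hn : 0 < n
    · have h8 : PySem.Int.floordiv n 8 = n / 8 := by
        simp [PySem.Int.floordiv, Int.fdiv_eq_ediv]
      have hrec : (PySem.Int.floordiv n 8).toNat ≤ k := by rw [h8]; omega
      have hm : PySem.Int.mod n 8 = n % 8 := by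
        simp [PySem.Int.mod, Int.fmod_eq_emod]
      have hmrange : 0 ≤ n % 8 ∧ n % 8 < 8 := ⟨Int.emod_nonneg n (by norm_num), by omega⟩
      rw [pvALoop, pvOctDigits]
      simp only [hn, dif_pos, if_pos]
      rw [ih _ _ hrec]
      rw [List.count_append]
      have hdig : (if PySem.Int.mod n 8 == 5 then (1:Int) else 0) =
          ([Char.ofNat (48 + (PySem.Int.mod n 8).toNat)].count '5' : Int) := by
        rw [hm]
        set m : Nat := (n % 8).toNat with hmdef
        have hm5 : (n % 8 == 5) = (m == 5) := by
          rcases hmrange with ⟨h1, h2⟩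
          interval_cases h : (n % 8) <;> simp [hmdef, h]
        rw [hm5]
        have hmlt : m < 8 := by omega
        interval_cases m <;> decide
      split_ifs with hc
      · rw [if_pos hc] at hdig
        push_cast
        omega
      · rw [if_neg hc] at hdig
        push_cast
        omega
    · rw [pvALoop, pvOctDigits]
      simp [hn]

-- ===== VERDICT (by name: the statement is the Claim_ definition above) =====
theorem system_osemkowy_spec : Claim_equal_system_osemkowy := by
  intro n _
  unfold Spec_system_osemkowy system_osemkowy system_osemkowy_alt
  have hloop := pvALoop_eq_count n.toNat n 0 (le_refl _)
  rw [hloop]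
  by_cases hn : n ≤ 0
  · have h0 : pvOctDigits n = [] := by rw [pvOctDigits]; simp; omega
    simp [h0, hn, PySem.Int.mod]
  · have hn' : ¬ (n ≤ 0) := hn
    simp only [hn', decide_false, Bool.false_or]
    have hmod : PySem.Int.mod (0 + ((pvOctDigits n).count '5' : Int)) 2 =
        (((pvOctDigits n).count '5') % 2 : Nat) := by
      simp only [PySem.Int.mod, Int.fmod_eq_emod, zero_add]
      omega
    rw [hmod]
    have hcc : ('0' :: 'o' :: pvOctDigits n).count '5' = (pvOctDigits n).count '5' := by
      simp [List.count_cons]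
    rw [hcc]
    rcases Nat.mod_two_eq_zero_or_one ((pvOctDigits n).count '5') with h | h <;> simp [h]
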